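-- pv_equiv track=rewrite | github.com/rightthumb/rightthumb-widgets-v0 | widgets/python/library/patterns/PatternDB.py | _iter_contiguous
-- ===== SOURCE A (Python) =====
-- from typing import Iterable, List, Tuple, Union, Optional, Dict, Any
--
-- def _iter_contiguous(seq: List[str], n: int) -> Iterable[Tuple[int, str]]:
-- 	if n <= 0 or n > len(seq):
-- 		return []
-- 	is_list_ngram = not all(len(x) == 1 for x in seq)
-- 	for i in range(0, len(seq) - n + 1):
-- 		chunk = seq[i : i + n]
-- 		key = "\x1f".join(chunk) if is_list_ngram else "".join(chunk)
-- 		yield (i, key)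
-- ===== SOURCE B (Python) =====
-- def _iter_contiguous(seq, n):
--     if n <= 0:
--         return
--     sep = "\x1f" if any(len(x) != 1 for x in seq) else ""
--     i, rest = 0, seq
--     while len(rest) >= n:
--         yield (i, sep.join(rest[:n]))
--         i, rest = i + 1, rest[1:]
-- ===== Notes on version B (the rewrite author's own statement) =====
-- stated objective: alternative
-- what changed: Replaced the index-based for-loop with i:i+n slicing by a sliding-window suffix iteration: walk the suffixes of seq, emitting sep.join(rest[:n]) while len(rest) >= n, with the separator chosen once up front; the n > len(seq) guard disappears into the loop condition.
import Mathlib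
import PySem

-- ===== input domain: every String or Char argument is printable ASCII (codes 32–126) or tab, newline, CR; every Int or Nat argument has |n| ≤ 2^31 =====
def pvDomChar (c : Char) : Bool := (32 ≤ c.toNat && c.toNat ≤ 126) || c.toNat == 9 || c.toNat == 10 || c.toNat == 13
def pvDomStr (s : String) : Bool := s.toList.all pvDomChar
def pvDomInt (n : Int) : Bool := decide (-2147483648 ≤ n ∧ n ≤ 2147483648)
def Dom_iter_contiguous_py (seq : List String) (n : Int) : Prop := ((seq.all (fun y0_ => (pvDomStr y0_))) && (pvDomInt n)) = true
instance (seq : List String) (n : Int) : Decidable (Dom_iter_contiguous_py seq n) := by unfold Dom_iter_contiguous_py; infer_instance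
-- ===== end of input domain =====

-- B replaces A's index loop with a sliding-window iteration over the suffixes of seq (alternative decomposition, same cost).

-- ===== PORT A =====
def iter_contiguous_py (seq : List String) (n : Int) : List (Int × String) :=
  if n ≤ 0 ∨ n > PySem.List.len seq then []
  else
    let is_list_ngram := !(seq.all (fun x => PySem.Str.len x == 1))
    (PySem.List.pyRange 0 (PySem.List.len seq - n + 1) 1).map (fun i =>
      let chunk := PySem.List.slice seq (some i) (some (i + n))
      let key := if is_list_ngram then PySem.Str.join "\x1f" chunk else PySem.Str.join "" chunk
      (i, key))

-- ===== PORT B =====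
-- the 'while len(rest) >= n' loop; the caller guarantees n ≥ 1, so rest = [] ends the loop
def iter_contiguous_alt_loop (sep : String) (n : Int) : List String → Int → List (Int × String)
  | [], _ => []
  | x :: xs, i =>
    if n ≤ PySem.List.len (x :: xs) then
      (i, PySem.Str.join sep (PySem.List.slice (x :: xs) none (some n))) ::
        iter_contiguous_alt_loop sep n xs (i + 1)
    else []

def iter_contiguous_py_alt (seq : List String) (n : Int) : List (Int × String) :=
  if n ≤ 0 then []
  else
    let sep := if seq.any (fun x => PySem.Str.len x != 1) then "\x1f" else ""
    iter_contiguous_alt_loop sep n seq 0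

-- ===== PRECONDITION & SPEC =====
def Spec_iter_contiguous_py (seq : List String) (n : Int) (out : List (Int × String)) : Prop := out = iter_contiguous_py_alt seq n
instance (seq : List String) (n : Int) (out : List (Int × String)) : Decidable (Spec_iter_contiguous_py seq n out) := by unfold Spec_iter_contiguous_py; infer_instance

-- ===== CLAIM (what is proved, stated in full; the proofs are below) =====
def Claim_equal_iter_contiguous_py : Prop := ∀ (seq : List String) (n : Int), Dom_iter_contiguous_py seq n → Spec_iter_contiguous_py seq n (iter_contiguous_py seq n)

-- ===== LEMMAS AND PROOFS =====

theorem slice_cons_shift (x : String) (xs : List String) (a n : Int) (ha : 0 ≤ a) (hn : 0 ≤ n) :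
    PySem.List.slice (x :: xs) (some (a + 1)) (some (a + 1 + n)) =
      PySem.List.slice xs (some a) (some (a + n)) := by
  rw [PySem.List.slice_toNat _ (by omega) (by omega),
      PySem.List.slice_toNat _ (by omega) (by omega)]
  rw [show (a + 1 + n).toNat - (a + 1).toNat = (a + n).toNat - a.toNat by omega,
      show (a + 1).toNat = a.toNat + 1 by omega, List.drop_succ_cons]

theorem any_ne_eq_not_all_eq (seq : List String) :
    (seq.any fun x => PySem.Str.len x != 1) = !(seq.all fun x => PySem.Str.len x == 1) := by
  simp [bne, List.all_eq_not_any_not]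

-- canonical form of B's loop, for n ≥ 1
theorem alt_loop_eq (sep : String) (n : Int) (hn : 1 ≤ n) :
    ∀ (rest : List String) (i : Int),
      iter_contiguous_alt_loop sep n rest i =
        (PySem.List.pyRange 0 (PySem.List.len rest - n + 1) 1).map
          (fun k => (i + k, PySem.Str.join sep (PySem.List.slice rest (some k) (some (k + n))))) := by
  intro rest
  induction rest with
  | nil =>
    intro i
    rw [PySem.List.pyRange_one_eq_nil (by simp [PySem.List.len_eq]; omega)]
    simp [iter_contiguous_alt_loop]
  | cons x xs ih =>
    intro i
    by_cases h : n ≤ PySem.List.len (x :: xs)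
    · have hlen : PySem.List.len (x :: xs) = PySem.List.len xs + 1 := by
        simp only [PySem.List.len_eq, List.length_cons]; omega
      rw [iter_contiguous_alt_loop, if_pos h,
          PySem.List.pyRange_one_cons (by rw [hlen] at h ⊢; omega)]
      refine List.cons_eq_cons.mpr ⟨?_, ?_⟩
      · have hs : PySem.List.slice (x :: xs) (some 0) (some (0 + n)) =
            PySem.List.slice (x :: xs) none (some n) := by
          rw [PySem.List.slice_toNat _ (by omega) (by omega), PySem.List.slice_to _ (by omega)]
          simp
        simp only [hs, add_zero]
      · rw [ih (i + 1), hlen,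
            show PySem.List.len xs + 1 - n + 1 = (PySem.List.len xs - n + 1) + 1 by ring]
        simp only [zero_add]
        rw [PySem.List.pyRange_one 0, PySem.List.pyRange_one 1, List.map_map, List.map_map,
            show PySem.List.len xs - n + 1 - 0 = PySem.List.len xs - n + 1 by ring,
            show PySem.List.len xs - n + 1 + 1 - 1 = PySem.List.len xs - n + 1 by ring]
        refine List.map_congr_left (fun k _ => ?_)
        simp only [Function.comp_apply, zero_add]
        have h2 := slice_cons_shift x xs (k : Int) n (by positivity) (by omega)
        rw [show (1 : Int) + (k : Int) = (k : Int) + 1 by ring, h2]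
        refine congrArg₂ Prod.mk (by ring) rfl
    · rw [iter_contiguous_alt_loop, if_neg h,
          PySem.List.pyRange_one_eq_nil (by simp [PySem.List.len_eq] at h ⊢; omega)]
      simp

-- ===== VERDICT (by name: the statement is the Claim_ definition above) =====
theorem iter_contiguous_py_spec : Claim_equal_iter_contiguous_py := by
  intro seq n _
  unfold Spec_iter_contiguous_py iter_contiguous_py iter_contiguous_py_alt
  by_cases h0 : n ≤ 0
  · simp [h0]
  · by_cases h1 : n > PySem.List.len seq
    · rw [if_pos (Or.inr h1), if_neg h0,
          alt_loop_eq _ _ (by omega), PySem.List.pyRange_one_eq_nil (by omega)]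
      simp
    · rw [if_neg (by omega), if_neg h0, alt_loop_eq _ _ (by omega)]
      refine List.map_congr_left (fun i _ => ?_)
      simp only [zero_add]
      rw [any_ne_eq_not_all_eq]
      cases hb : (seq.all fun x => PySem.Str.len x == 1) <;> simp
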